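-- pv_equiv track=rewrite | github.com/SindromRadioSpb/HpPrimeEditorHebrew | tools/generate_hebrew_font.py | dilate_once
-- ===== SOURCE A (Python) =====
-- CELL_W = 14
--
-- def rows_to_grid(rows):
--     """Convert list of row integers to 2D pixel grid (list of lists)."""
--     return [
--         [(r >> (CELL_W - 1 - x)) & 1 for x in range(CELL_W)]
--         for r in rows
--     ]
--
-- def grid_to_rows(grid):
--     """Convert 2D pixel grid back to list of row integers."""
--     result = []
--     for row_pixels in grid:
--         val = 0
--         for x, p in enumerate(row_pixels):
--             if p:
--                 val |= (1 << (CELL_W - 1 - x))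
--         result.append(val)
--     return result
--
-- def dilate_once(rows):
--     """
--     Dilate filled pixels by 1 step (4-connectivity).
--     Use sparingly -- thickens ALL strokes uniformly.
--     """
--     h = len(rows)
--     grid = rows_to_grid(rows)
--     new_grid = [row[:] for row in grid]
--
--     for y in range(h):
--         for x in range(CELL_W):
--             if grid[y][x]:
--                 new_grid[y][x] = 1
--                 if y > 0:         new_grid[y-1][x] = 1
--                 if y < h-1:       new_grid[y+1][x] = 1
--                 if x > 0:         new_grid[y][x-1] = 1
--                 if x < CELL_W-1:  new_grid[y][x+1] = 1
--
--     return grid_to_rows(new_grid)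
-- ===== SOURCE B (Python) =====
-- CELL_W = 14
--
-- def dilate_once(rows):
--     """
--     Dilate filled pixels by 1 step (4-connectivity).
--     Bitwise: each output row is the OR of the row, its horizontal shifts,
--     and the two vertically adjacent rows, masked to CELL_W bits.
--     """
--     mask = (1 << CELL_W) - 1
--     ms = [r & mask for r in rows]
--     n = len(ms)
--     out = []
--     for i, m in enumerate(ms):
--         v = m | (m << 1) | (m >> 1)
--         if i > 0:
--             v |= ms[i - 1]
--         if i + 1 < n:
--             v |= ms[i + 1]
--         out.append(v & mask)
--     return out
-- ===== Notes on version B (the rewrite author's own statement) =====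
-- stated objective: faster
-- what changed: Replaces the pixel-grid construction and the per-pixel neighbour-writing double loop with a single pass of whole-row integer bit operations: each output row is (m | m<<1 | m>>1 | prev | next) & mask.
import Mathlib
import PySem

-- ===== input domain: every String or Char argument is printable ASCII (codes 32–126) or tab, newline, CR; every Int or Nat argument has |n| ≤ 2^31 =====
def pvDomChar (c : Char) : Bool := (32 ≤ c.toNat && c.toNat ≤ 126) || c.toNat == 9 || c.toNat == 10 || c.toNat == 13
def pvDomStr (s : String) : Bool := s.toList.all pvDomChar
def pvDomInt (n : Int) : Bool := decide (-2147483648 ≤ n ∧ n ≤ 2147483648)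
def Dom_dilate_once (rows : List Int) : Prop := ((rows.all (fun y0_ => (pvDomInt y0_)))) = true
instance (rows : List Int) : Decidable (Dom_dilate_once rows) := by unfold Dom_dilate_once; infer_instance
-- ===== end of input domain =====

-- B replaces A's pixel-grid double loop with one pass of whole-row bitwise shifts/ORs (objective: faster, constant-factor).


-- ===== PORT A =====
-- 'new_grid[y][x] = 1' (all of A's writes are in range; out of range List.set would be the identity)

def touch (g : List (List Int)) (y x : Nat) : List (List Int) :=
  g.set y ((g.getD y []).set x 1)

-- body of A's inner loop (reads the ORIGINAL grid, writes the new one)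

def stepA (grid : List (List Int)) (h y : Nat) (g : List (List Int)) (x : Nat) : List (List Int) :=
  if (grid.getD y []).getD x 0 ≠ 0 then
    let g1 := touch g y x
    let g2 := if 0 < y then touch g1 (y - 1) x else g1
    let g3 := if y < h - 1 then touch g2 (y + 1) x else g2
    let g4 := if 0 < x then touch g3 y (x - 1) else g3
    let g5 := if x < 13 then touch g4 y (x + 1) else g4
    g5
  else g

-- body of A's outer loop

def rowPass (grid : List (List Int)) (h : Nat) (g : List (List Int)) (y : Nat) : List (List Int) :=
  (List.range 14).foldl (stepA grid h y) g

-- helper rows_to_grid from the Python module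

def rowsToGrid (rows : List Int) : List (List Int) :=
  rows.map (fun (r : Int) => (List.range 14).map (fun (x : Nat) => PySem.Int.band (r >>> ((13 - x : Nat))) 1))

-- helper grid_to_rows from the Python module (appending loop as map; inner enumerate loop as foldl)

def gridToRows (grid : List (List Int)) : List Int :=
  grid.map (fun (row : List Int) =>
    (row.zipIdx.foldl (fun (val : Int) (px : Int × Nat) =>
      if px.1 ≠ 0 then PySem.Int.bor val ((1 : Int) <<< (13 - px.2)) else val) 0))

def dilate_once (rows : List Int) : List Int :=
  let h := rows.length
  let grid := rowsToGrid rows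
  let newGrid := grid
  gridToRows ((List.range h).foldl (rowPass grid h) newGrid)

-- ===== PORT B =====

def dilate_once_alt (rows : List Int) : List Int :=
  let mask : Int := ((1 : Int) <<< (14 : Nat)) - 1
  let ms := rows.map (fun (r : Int) => PySem.Int.band r mask)
  let n := ms.length
  ms.zipIdx.foldl (fun (out : List Int) (mi : Int × Nat) =>
    let v0 := PySem.Int.bor (PySem.Int.bor mi.1 (mi.1 <<< (1 : Nat))) (mi.1 >>> (1 : Nat))
    let v1 := if 0 < mi.2 then PySem.Int.bor v0 (ms.getD (mi.2 - 1) 0) else v0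
    let v2 := if mi.2 + 1 < n then PySem.Int.bor v1 (ms.getD (mi.2 + 1) 0) else v1
    out ++ [PySem.Int.band v2 mask]) []

-- ===== PRECONDITION & SPEC =====
def Spec_dilate_once (rows : List Int) (out : List Int) : Prop := out = dilate_once_alt rows
instance (rows : List Int) (out : List Int) : Decidable (Spec_dilate_once rows out) := by unfold Spec_dilate_once; infer_instance

-- ===== CLAIM (what is proved, stated in full; the proofs are below) =====
def Claim_equal_dilate_once : Prop := ∀ (rows : List Int), Dom_dilate_once rows → Spec_dilate_once rows (dilate_once rows)

-- ===== LEMMAS AND PROOFS =====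

theorem int_shiftLeft_natCast (a k : Nat) : ((a : Int) <<< k) = ((a <<< k : Nat) : Int) := rfl

theorem int_shiftRight_natCast (a k : Nat) : ((a : Int) >>> k) = ((a >>> k : Nat) : Int) := rfl

theorem bit_ne_zero (m k : Nat) : ((m >>> k) &&& 1) ≠ 0 ↔ m.testBit k = true := by
  rw [Nat.testBit_eq_decide_div_mod_eq, Nat.and_one_is_mod, Nat.shiftRight_eq_div_pow]
  simp only [decide_eq_true_eq]
  omega

theorem band_mask_toNat (r : Int) :
    PySem.Int.band r 16383 = ((PySem.Int.band r 16383).toNat : Int) ∧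
      (PySem.Int.band r 16383).toNat < 16384 := by
  unfold PySem.Int.band
  rcases r with m | m
  · simp only [Int.ofNat_eq_natCast]
    norm_num
    have : (m &&& 16383) = m % 16384 := by
      rw [show (16383:Nat) = 2^14 - 1 by norm_num, Nat.and_two_pow_sub_one_eq_mod]
    simp [this]; omega
  · rw [if_neg (by omega), if_pos (by norm_num)]
    norm_num
    omega

theorem band_negSucc (m : Nat) (b : Nat) :
    PySem.Int.band (Int.negSucc m) (b : Int) = ((b - (b &&& m) : Nat) : Int) := by
  unfold PySem.Int.band
  rw [if_neg (by omega), if_pos (by positivity)]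
  norm_num

theorem band_shift_one (r : Int) (k : Nat) (hk : k < 14) :
    (PySem.Int.band (r >>> k) 1 ≠ 0) ↔ (PySem.Int.band r 16383).toNat.testBit k = true := by
  have e1 : ∀ a : Nat, (a &&& 16383) = a % 2 ^ 14 := by
    intro a
    rw [show (16383:Nat) = 2^14 - 1 by norm_num, Nat.and_two_pow_sub_one_eq_mod]
  rcases r with m | m
  · have h1 : (Int.ofNat m) >>> k = ((m >>> k : Nat) : Int) := rfl
    rw [h1, show (1:Int) = ((1:Nat):Int) from rfl, PySem.Int.band_natCast]
    have h2 : PySem.Int.band (Int.ofNat m) ((16383:Nat) : Int) = ((m &&& 16383 : Nat) : Int) :=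
      PySem.Int.band_natCast m 16383
    rw [show ((16383:Nat) : Int) = (16383:Int) from rfl] at h2
    rw [Int.ofNat_eq_natCast] at h2 ⊢
    rw [h2, Int.toNat_natCast, e1, Nat.testBit_mod_two_pow]
    rw [show (decide (k < 14) && m.testBit k) = m.testBit k by simp [hk]]
    rw [← bit_ne_zero m k]
    exact_mod_cast Iff.rfl
  · have h1 : (Int.negSucc m) >>> k = Int.negSucc (m >>> k) := rfl
    have h2 := band_negSucc (m >>> k) 1
    have h3 := band_negSucc m 16383
    rw [show ((1:Nat) : Int) = (1:Int) from rfl] at h2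
    rw [show ((16383:Nat) : Int) = (16383:Int) from rfl] at h3
    rw [h1, h2, h3]
    have hmlt : m % 2 ^ 14 < 2 ^ 14 := Nat.mod_lt _ (by norm_num)
    have h4 : (16383 - (16383 &&& m)) = 2 ^ 14 - (m % 2 ^ 14 + 1) := by
      rw [Nat.and_comm, e1]; omega
    rw [h4, Int.toNat_natCast, Nat.testBit_two_pow_sub_succ hmlt, Nat.testBit_mod_two_pow]
    rw [show (decide (k < 14) && !(decide (k < 14) && m.testBit k))
          = !(m.testBit k) by simp [hk]]
    have h5 : (1 - (1 &&& (m >>> k)) : Nat) ≠ 0 ↔ ¬ ((m >>> k) &&& 1) ≠ 0 := by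
      rw [Nat.and_comm] at *
      constructor
      · intro h hh
        have : (1 &&& (m >>> k)) = (m >>> k) % 2 := Nat.one_and_eq_mod_two _
        omega
      · intro h
        have : (1 &&& (m >>> k)) = (m >>> k) % 2 := Nat.one_and_eq_mod_two _
        simp only [ne_eq, not_not] at h
        omega
    constructor
    · intro h
      have hnat : (1 - (1 &&& (m >>> k)) : Nat) ≠ 0 := by exact_mod_cast h
      have hnot : ¬ ((m >>> k) &&& 1) ≠ 0 := h5.mp hnat
      rw [bit_ne_zero m k] at hnot
      simp at hnot ⊢
      exact hnot
    · intro h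
      simp at h
      have : ¬ m.testBit k = true := by simp [h]
      rw [← bit_ne_zero m k] at this
      have h6 := h5.mpr this
      intro hc
      exact h6 (by exact_mod_cast hc)

def valOf (f : Nat → Bool) : Nat :=
  (List.range 14).foldl (fun a k => if f k then a ||| 1 <<< k else a) 0

theorem valOf_fold_testBit (f : Nat → Bool) :
    ∀ (L : List Nat) (a : Nat) (j : Nat),
      ((L.foldl (fun a k => if f k then a ||| 1 <<< k else a) a).testBit j)
        = (a.testBit j || (decide (j ∈ L) && f j)) := by
  intro L
  induction L with
  | nil => simp
  | cons k L ih =>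
    intro a j
    simp only [List.foldl_cons, ih, List.mem_cons]
    have hone : ∀ p : Nat, Nat.testBit 1 p = decide (p = 0) := by
      intro p
      rw [Nat.testBit_eq_decide_div_mod_eq]
      rcases p with _ | p
      · simp
      · rw [Nat.div_eq_of_lt (Nat.one_lt_two_pow_iff.mpr (by omega))]
        simp
    by_cases hfk : f k
    · simp only [hfk, if_pos]
      by_cases hjk : j = k
      · subst hjk
        simp [Nat.testBit_or, Nat.testBit_shiftLeft, hone, hfk]
      · have h1 : (decide (k ≤ j) && Nat.testBit 1 (j - k)) = false := by
          simp [hone]; omega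
        simp [Nat.testBit_or, Nat.testBit_shiftLeft, h1, hjk]
    · simp only [hfk, if_neg, Bool.not_eq_true]
      by_cases hjk : j = k
      · subst hjk; simp [hfk]
      · simp [hjk]

theorem valOf_testBit (f : Nat → Bool) (j : Nat) :
    (valOf f).testBit j = (decide (j < 14) && f j) := by
  unfold valOf
  rw [valOf_fold_testBit]
  simp [List.mem_range]


def natOf (row : List Int) (i a : Nat) : Nat :=
  (row.zipIdx i).foldl (fun (A : Nat) (px : Int × Nat) => if px.1 ≠ 0 then A ||| 1 <<< (13 - px.2) else A) a

theorem gridToRows_fold_cast (row : List Int) : ∀ (i a : Nat),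
    (row.zipIdx i).foldl (fun (val : Int) (px : Int × Nat) =>
        if px.1 ≠ 0 then PySem.Int.bor val ((1 : Int) <<< (13 - px.2)) else val) (a : Int)
      = ((natOf row i a : Nat) : Int) := by
  induction row with
  | nil => intro i a; simp [natOf]
  | cons x row ih =>
    intro i a
    simp only [natOf, List.zipIdx_cons, List.foldl_cons] at *
    by_cases hx : x ≠ 0
    · rw [if_pos hx, if_pos hx,
        show ((1 : Int) <<< (13 - i)) = (((1 <<< (13 - i) : Nat)) : Int) from rfl,
        PySem.Int.bor_natCast, ih]
    · rw [if_neg hx, if_neg hx, ih]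

theorem natOf_testBit (row : List Int) : ∀ (i a : Nat), i + row.length ≤ 14 → ∀ j,
    ((natOf row i a).testBit j = true ↔
      (a.testBit j = true ∨ ∃ c, c < row.length ∧ 13 - (i + c) = j ∧ row.getD c 0 ≠ 0)) := by
  induction row with
  | nil => intro i a _ j; simp [natOf]
  | cons x row ih =>
    intro i a hle j
    have hi : i ≤ 13 := by simp only [List.length_cons] at hle; omega
    simp only [natOf, List.zipIdx_cons, List.foldl_cons]
    have step : ((if x ≠ 0 then a ||| 1 <<< (13 - i) else a)).testBit j = true ↔
        (a.testBit j = true ∨ (x ≠ 0 ∧ j = 13 - i)) := by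
      by_cases hx : x ≠ 0
      · rw [if_pos hx]
        have hone : ∀ p : Nat, Nat.testBit 1 p = decide (p = 0) := by
          intro p
          rw [Nat.testBit_eq_decide_div_mod_eq]
          rcases p with _ | p
          · simp
          · rw [Nat.div_eq_of_lt (Nat.one_lt_two_pow_iff.mpr (by omega))]
            simp
        simp only [Nat.testBit_or, Nat.testBit_shiftLeft, hone]
        constructor
        · intro h
          rcases Bool.or_eq_true_iff.mp h with h | h
          · exact Or.inl h
          · simp only [Bool.and_eq_true, decide_eq_true_eq] at h
            exact Or.inr ⟨hx, by omega⟩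
        · rintro (h | ⟨-, hj⟩)
          · exact Bool.or_eq_true_iff.mpr (Or.inl h)
          · refine Bool.or_eq_true_iff.mpr (Or.inr ?_)
            simp only [Bool.and_eq_true, decide_eq_true_eq]
            omega
      · simp [hx]
    have hlen : (i + 1) + row.length ≤ 14 := by simp only [List.length_cons] at hle; omega
    rw [show (List.foldl (fun (A : Nat) (px : Int × Nat) =>
          if px.1 ≠ 0 then A ||| 1 <<< (13 - px.2) else A)
          (if x ≠ 0 then a ||| 1 <<< (13 - i) else a) (row.zipIdx (i + 1)))
        = natOf row (i + 1) (if x ≠ 0 then a ||| 1 <<< (13 - i) else a) from rfl]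
    rw [ih (i + 1) _ hlen j]
    rw [step]
    constructor
    · rintro ((h | h) | ⟨c, hc, hcj, hne⟩)
      · exact Or.inl h
      · obtain ⟨hx0, hj⟩ := h
        exact Or.inr ⟨0, by simp, by omega, by simpa using hx0⟩
      · exact Or.inr ⟨c + 1, by simpa using hc, by omega, by simpa using hne⟩
    · rintro (h | ⟨c, hc, hcj, hne⟩)
      · exact Or.inl (Or.inl h)
      · rcases c with _ | c
        · exact Or.inl (Or.inr ⟨by simpa using hne, by omega⟩)
        · exact Or.inr ⟨c, by simpa using hc, by omega, by simpa using hne⟩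

def cell (g : List (List Int)) (t u : Nat) : Int := (g.getD t []).getD u 0

def Shaped (n : Nat) (g : List (List Int)) : Prop :=
  g.length = n ∧ ∀ t, t < n → (g.getD t []).length = 14

theorem getD_set_list {g : List (List Int)} {y : Nat} {r : List Int} (t : Nat) :
    (g.set y r).getD t [] = if t = y ∧ y < g.length then r else g.getD t [] := by
  simp only [List.getD, List.getElem?_set]
  split_ifs with h1 h2 h3 h4 <;> simp_all

theorem getD_set_int {r : List Int} {x : Nat} {v : Int} (u : Nat) :
    (r.set x v).getD u 0 = if u = x ∧ x < r.length then v else r.getD u 0 := by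
  simp only [List.getD, List.getElem?_set]
  split_ifs with h1 h2 h3 h4 <;> simp_all

theorem shaped_touch {n : Nat} {g : List (List Int)} (hg : Shaped n g) (y x : Nat) :
    Shaped n (touch g y x) := by
  obtain ⟨hlen, hrow⟩ := hg
  refine ⟨by simp [touch, hlen], ?_⟩
  intro t ht
  unfold touch
  rw [getD_set_list t]
  by_cases h : t = y ∧ y < g.length
  · rw [if_pos h]
    rw [List.length_set]
    exact h.1 ▸ hrow t ht
  · rw [if_neg h]
    exact hrow t ht

theorem cell_touch {n : Nat} {g : List (List Int)} (hg : Shaped n g) {y x : Nat}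
    (hy : y < n) (hx : x < 14) (t u : Nat) :
    cell (touch g y x) t u = if t = y ∧ u = x then 1 else cell g t u := by
  obtain ⟨hlen, hrow⟩ := hg
  unfold cell touch
  rw [getD_set_list t]
  by_cases ht : t = y
  · subst ht
    rw [if_pos ⟨rfl, hlen ▸ hy⟩]
    rw [getD_set_int u]
    have : x < (g.getD t []).length := by rw [hrow t hy]; exact hx
    by_cases hu : u = x
    · rw [if_pos ⟨hu, this⟩, if_pos ⟨rfl, hu⟩]
    · rw [if_neg (by tauto), if_neg (by tauto)]
  · rw [if_neg (by tauto), if_neg (by tauto)]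

def hits (grid : List (List Int)) (h y x t u : Nat) : Bool :=
  ((grid.getD y []).getD x 0 != 0) &&
  ((t == y && u == x) || (decide (0 < y) && t == y - 1 && u == x) ||
   (decide (y < h - 1) && t == y + 1 && u == x) ||
   (decide (0 < x) && t == y && u == x - 1) || (decide (x < 13) && t == y && u == x + 1))

theorem shaped_mtouch {n : Nat} {g : List (List Int)} (hg : Shaped n g)
    (c : Prop) [Decidable c] (py px : Nat) :
    Shaped n (if c then touch g py px else g) := by
  split_ifs
  · exact shaped_touch hg _ _
  · exact hg

theorem cell_mtouch {n : Nat} {g : List (List Int)} (hg : Shaped n g)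
    {c : Prop} [Decidable c] {py px : Nat} (hc : c → py < n ∧ px < 14) (t u : Nat) :
    cell (if c then touch g py px else g) t u
      = if c ∧ t = py ∧ u = px then 1 else cell g t u := by
  by_cases h1 : c
  · rw [if_pos h1, cell_touch hg (hc h1).1 (hc h1).2 t u]
    by_cases h2 : t = py ∧ u = px
    · rw [if_pos h2, if_pos ⟨h1, h2⟩]
    · rw [if_neg h2, if_neg (by tauto)]
  · rw [if_neg h1, if_neg (by tauto)]

theorem shaped_stepA {n : Nat} {grid g : List (List Int)} (hg : Shaped n g) (y x : Nat) :
    Shaped n (stepA grid n y g x) := by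
  unfold stepA
  by_cases hsrc : (grid.getD y []).getD x 0 ≠ 0
  · rw [if_pos hsrc]
    exact shaped_mtouch (shaped_mtouch (shaped_mtouch (shaped_mtouch (shaped_touch hg _ _) _ _ _) _ _ _) _ _ _) _ _ _
  · rw [if_neg hsrc]
    exact hg

theorem cell_stepA {n : Nat} {grid g : List (List Int)} (hg : Shaped n g) {y x : Nat}
    (hy : y < n) (hx : x < 14) (t u : Nat) :
    cell (stepA grid n y g x) t u = if hits grid n y x t u then 1 else cell g t u := by
  unfold stepA hits
  by_cases hsrc : (grid.getD y []).getD x 0 ≠ 0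
  · rw [if_pos hsrc]
    dsimp only
    have hg1 : Shaped n (touch g y x) := shaped_touch hg y x
    have hg2 : Shaped n (if 0 < y then touch (touch g y x) (y-1) x else touch g y x) :=
      shaped_mtouch hg1 _ _ _
    have hg3 : Shaped n _ := shaped_mtouch hg2 (y < n - 1) (y+1) x
    have hg4 : Shaped n _ := shaped_mtouch hg3 (0 < x) y (x-1)
    rw [cell_mtouch hg4 (fun h => ⟨hy, by omega⟩) t u,
        cell_mtouch hg3 (fun h => ⟨hy, by omega⟩) t u,
        cell_mtouch hg2 (fun h => ⟨by omega, hx⟩) t u,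
        cell_mtouch hg1 (fun h => ⟨by omega, hx⟩) t u,
        cell_touch hg hy hx t u]
    have hsrcb : ((grid.getD y []).getD x 0 != 0) = true := by simpa using hsrc
    simp only [hsrcb, Bool.true_and]
    split_ifs <;> simp_all <;> omega
  · rw [if_neg hsrc]
    have hb : ((grid.getD y []).getD x 0 != 0) = false := by simpa using hsrc
    rw [hb]
    simp

theorem cell_foldx {n : Nat} {grid : List (List Int)} {y : Nat} (hy : y < n) :
    ∀ (L : List Nat) (g : List (List Int)), Shaped n g → (∀ x ∈ L, x < 14) →
      Shaped n (L.foldl (stepA grid n y) g) ∧ ∀ t u,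
        cell (L.foldl (stepA grid n y) g) t u =
          if L.any (fun x => hits grid n y x t u) then 1 else cell g t u := by
  intro L
  induction L with
  | nil => intro g hg _; exact ⟨hg, by simp⟩
  | cons x L ih =>
    intro g hg hmem
    have hx : x < 14 := hmem x (by simp)
    have hg' := shaped_stepA (grid := grid) hg y x
    obtain ⟨hsh, hcell⟩ := ih (stepA grid n y g x) hg' (fun z hz => hmem z (by simp [hz]))
    refine ⟨by simpa using hsh, ?_⟩
    intro t u
    simp only [List.foldl_cons, List.any_cons]
    rw [hcell t u, cell_stepA hg hy hx t u]
    by_cases h1 : (L.any (fun z => hits grid n y z t u)) = true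
    · simp [h1]
    · simp only [Bool.not_eq_true] at h1
      simp only [h1]
      by_cases h2 : hits grid n y x t u = true
      · simp [h2]
      · simp only [Bool.not_eq_true] at h2
        simp [h2]

theorem cell_foldy {n : Nat} {grid : List (List Int)} :
    ∀ (L : List Nat) (g : List (List Int)), Shaped n g → (∀ y ∈ L, y < n) →
      Shaped n (L.foldl (rowPass grid n) g) ∧ ∀ t u,
        cell (L.foldl (rowPass grid n) g) t u =
          if L.any (fun y => (List.range 14).any (fun x => hits grid n y x t u)) then 1
          else cell g t u := by
  intro L
  induction L with
  | nil => intro g hg _; exact ⟨hg, by simp⟩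
  | cons y L ih =>
    intro g hg hmem
    have hy : y < n := hmem y (by simp)
    obtain ⟨hsh1, hcell1⟩ := cell_foldx (grid := grid) hy (List.range 14) g hg
      (fun z hz => by simpa using hz)
    obtain ⟨hsh, hcell⟩ := ih (rowPass grid n g y) (by simpa [rowPass] using hsh1)
      (fun z hz => hmem z (by simp [hz]))
    refine ⟨by simpa using hsh, ?_⟩
    intro t u
    simp only [List.foldl_cons, List.any_cons]
    rw [hcell t u]
    have : cell (rowPass grid n g y) t u =
        if (List.range 14).any (fun x => hits grid n y x t u) then 1 else cell g t u := by
      simpa [rowPass] using hcell1 t u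
    rw [this]
    by_cases h1 : (L.any (fun z => (List.range 14).any fun x => hits grid n z x t u)) = true
    · simp [h1]
    · simp only [Bool.not_eq_true] at h1
      simp only [h1]
      by_cases h2 : ((List.range 14).any fun x => hits grid n y x t u) = true
      · simp [h2]
      · simp only [Bool.not_eq_true] at h2
        simp [h2]

def rowBits (rows : List Int) (y : Nat) : Nat := (PySem.Int.band (rows.getD y 0) 16383).toNat

theorem rowBits_lt (rows : List Int) (y : Nat) : rowBits rows y < 16384 :=
  (band_mask_toNat _).2

theorem shaped_rowsToGrid (rows : List Int) : Shaped rows.length (rowsToGrid rows) := by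
  refine ⟨by simp [rowsToGrid], ?_⟩
  intro t ht
  simp [rowsToGrid, List.getD, List.getElem?_map, ht]

theorem cell_rowsToGrid (rows : List Int) {t u : Nat} (ht : t < rows.length) (hu : u < 14) :
    cell (rowsToGrid rows) t u = PySem.Int.band ((rows.getD t 0) >>> (13 - u)) 1 := by
  unfold cell rowsToGrid
  have h1 : (rows.map (fun (r : Int) => (List.range 14).map
      (fun (x : Nat) => PySem.Int.band (r >>> ((13 - x : Nat))) 1))).getD t []
      = (List.range 14).map (fun (x : Nat) => PySem.Int.band ((rows.getD t 0) >>> ((13 - x : Nat))) 1) := by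
    simp only [List.getD, List.getElem?_map]
    rw [List.getElem?_eq_getElem ht]
    simp [List.getD, List.getElem?_eq_getElem ht]
  rw [h1]
  simp only [List.getD, List.getElem?_map, List.getElem?_range, hu]
  simp [List.getElem?_eq_getElem (by simpa using hu : u < (List.range 14).length)]

theorem grid_on_iff (rows : List Int) {y x : Nat} (hy : y < rows.length) (hx : x < 14) :
    (((rowsToGrid rows).getD y []).getD x 0 ≠ 0) ↔ (rowBits rows y).testBit (13 - x) = true := by
  have h := cell_rowsToGrid rows hy hx
  unfold cell at h
  rw [h]
  exact band_shift_one _ _ (by omega)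

def dil (rows : List Int) (y k : Nat) : Bool :=
  (rowBits rows y).testBit k || (rowBits rows y).testBit (k + 1) ||
  (decide (0 < k) && (rowBits rows y).testBit (k - 1)) ||
  (decide (0 < y) && (rowBits rows (y - 1)).testBit k) ||
  (decide (y + 1 < rows.length) && (rowBits rows (y + 1)).testBit k)

theorem hits_iff_dil (rows : List Int) {t j : Nat} (ht : t < rows.length) (hj : j < 14) :
    (((List.range rows.length).any (fun y =>
        (List.range 14).any (fun x => hits (rowsToGrid rows) rows.length y x t (13 - j)))) ||
      (rowBits rows t).testBit j) = dil rows t j := by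
  apply Bool.coe_iff_coe.mp
  unfold hits dil
  simp only [Bool.or_eq_true, List.any_eq_true, List.mem_range, Bool.and_eq_true,
    decide_eq_true_eq, beq_iff_eq, bne_iff_ne]
  constructor
  · rintro (⟨y, hy, x, hx, hsrc, hloc⟩ | hb)
    · have hbit : (rowBits rows y).testBit (13 - x) = true := (grid_on_iff rows hy hx).mp hsrc
      rcases hloc with (((l1 | l2) | l3) | l4) | l5
      · obtain ⟨h1, h2⟩ := l1
        left; left; left; left
        rw [show y = t by omega, show (13 - x) = j by omega] at hbit
        exact hbit
      · obtain ⟨⟨h0, h1⟩, h2⟩ := l2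
        right
        refine ⟨by omega, ?_⟩
        rw [show y = t + 1 by omega, show (13 - x) = j by omega] at hbit
        exact hbit
      · obtain ⟨⟨h0, h1⟩, h2⟩ := l3
        left; right
        refine ⟨by omega, ?_⟩
        rw [show y = t - 1 by omega, show (13 - x) = j by omega] at hbit
        exact hbit
      · obtain ⟨⟨h0, h1⟩, h2⟩ := l4
        left; left; right
        refine ⟨by omega, ?_⟩
        rw [show y = t by omega, show (13 - x) = j - 1 by omega] at hbit
        exact hbit
      · obtain ⟨⟨h0, h1⟩, h2⟩ := l5
        left; left; left; right
        rw [show y = t by omega, show (13 - x) = j + 1 by omega] at hbit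
        exact hbit
    · left; left; left; left; exact hb
  · rintro ((((hb | hb) | ⟨h0, hb⟩) | ⟨h0, hb⟩) | ⟨h0, hb⟩)
    · right; exact hb
    · by_cases hj13 : j = 13
      · exfalso
        rw [hj13] at hb
        have := Nat.testBit_lt_two_pow (x := rowBits rows t) (i := 14)
          (by have := rowBits_lt rows t; omega)
        rw [this] at hb; exact Bool.false_ne_true hb
      · left
        refine ⟨t, ht, 12 - j, by omega, ?_, ?_⟩
        · exact (grid_on_iff rows ht (by omega)).mpr (by rw [show 13 - (12 - j) = j + 1 by omega]; exact hb)
        · right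
          exact ⟨⟨by omega, rfl⟩, by omega⟩
    · left
      refine ⟨t, ht, 14 - j, by omega, ?_, ?_⟩
      · exact (grid_on_iff rows ht (by omega)).mpr (by rw [show 13 - (14 - j) = j - 1 by omega]; exact hb)
      · left; right
        exact ⟨⟨by omega, rfl⟩, by omega⟩
    · left
      refine ⟨t - 1, by omega, 13 - j, by omega, ?_, ?_⟩
      · exact (grid_on_iff rows (by omega) (by omega)).mpr (by rw [show 13 - (13 - j) = j by omega]; exact hb)
      · left; left; right
        exact ⟨⟨by omega, by omega⟩, rfl⟩
    · left
      refine ⟨t + 1, by omega, 13 - j, by omega, ?_, ?_⟩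
      · exact (grid_on_iff rows (by omega) (by omega)).mpr (by rw [show 13 - (13 - j) = j by omega]; exact hb)
      · left; left; left; right
        exact ⟨⟨by omega, by omega⟩, rfl⟩

theorem dilate_once_eq_canon (rows : List Int) :
    dilate_once rows
      = (List.range rows.length).map (fun y => ((valOf (dil rows y) : Nat) : Int)) := by
  have hgrid := shaped_rowsToGrid rows
  obtain ⟨hsh, hcell⟩ := cell_foldy (n := rows.length) (grid := rowsToGrid rows)
    (List.range rows.length) (rowsToGrid rows) hgrid (fun z hz => by simpa using hz)
  unfold dilate_once gridToRows
  apply List.ext_getElem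
  · simp [hsh.1]
  intro i h1 h2
  have hi : i < rows.length := by simpa using h2
  have hilt : i < ((List.range rows.length).foldl (rowPass (rowsToGrid rows) rows.length)
      (rowsToGrid rows)).length := by rw [hsh.1]; exact hi
  simp only [List.getElem_map, List.getElem_range]
  set F := (List.range rows.length).foldl (rowPass (rowsToGrid rows) rows.length)
      (rowsToGrid rows) with hF
  have hrowD : F.getD i [] = F[i] := by
    simp [List.getD, List.getElem?_eq_getElem hilt]
  have hlen14 : (F[i] : List Int).length = 14 := by
    rw [← hrowD]; exact hsh.2 i hi
  have cast0 : (F[i] : List Int).zipIdx.foldl (fun (val : Int) (px : Int × Nat) =>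
      if px.1 ≠ 0 then PySem.Int.bor val ((1 : Int) <<< (13 - px.2)) else val) (0 : Int)
      = ((natOf (F[i] : List Int) 0 0 : Nat) : Int) := gridToRows_fold_cast _ 0 0
  rw [cast0]
  congr 1
  apply Nat.eq_of_testBit_eq
  intro j
  apply Bool.coe_iff_coe.mp
  rw [valOf_testBit]
  rw [natOf_testBit _ 0 0 (by omega)]
  by_cases hj : j < 14
  · simp only [hj, decide_true, Bool.true_and]
    have key : ∀ c, c < 14 → ((F[i] : List Int).getD c 0 ≠ 0 ↔
        (((List.range rows.length).any (fun y =>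
            (List.range 14).any (fun x => hits (rowsToGrid rows) rows.length y x i c))) = true
          ∨ cell (rowsToGrid rows) i c ≠ 0)) := by
      intro c hc
      have := hcell i c
      unfold cell at this
      rw [hrowD] at this
      rw [this]
      by_cases hb : ((List.range rows.length).any (fun y =>
          (List.range 14).any (fun x => hits (rowsToGrid rows) rows.length y x i c))) = true
      · simp [hb]
      · simp only [Bool.not_eq_true] at hb
        simp [hb, cell]
    constructor
    · rintro (h0 | ⟨c, hc, hcj, hne⟩)
      · simp at h0
      · have hc13 : c = 13 - j := by omega
        subst hc13
        rcases (key _ (by omega)).mp hne with hb | hgne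
        · rw [← hits_iff_dil rows hi hj]
          simp [hb]
        · have : (rowBits rows i).testBit j = true := by
            have := (grid_on_iff rows hi (x := 13 - j) (by omega)).mp hgne
            rwa [show 13 - (13 - j) = j by omega] at this
          rw [← hits_iff_dil rows hi hj]
          simp [this]
    · intro hd
      right
      refine ⟨13 - j, by omega, by omega, ?_⟩
      apply (key _ (by omega)).mpr
      rw [← hits_iff_dil rows hi hj] at hd
      rcases Bool.or_eq_true_iff.mp hd with hb | hbit
      · exact Or.inl hb
      · right
        apply (grid_on_iff rows hi (x := 13 - j) (by omega)).mpr
        rwa [show 13 - (13 - j) = j by omega]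
  · simp only [hj, decide_false, Bool.false_and]
    constructor
    · rintro (h0 | ⟨c, hc, hcj, hne⟩)
      · simp at h0
      · omega
    · intro h; exact absurd h (by simp)

theorem ms_getD (rows : List Int) (y : Nat) (hy : y < rows.length) :
    (rows.map (fun (r : Int) => PySem.Int.band r (((1 : Int) <<< (14 : Nat)) - 1))).getD y 0
      = ((rowBits rows y : Nat) : Int) := by
  have hmask : ((1 : Int) <<< (14 : Nat)) - 1 = 16383 := rfl
  rw [hmask]
  have h1 : (rows.map (fun (r : Int) => PySem.Int.band r 16383)).getD y 0
      = PySem.Int.band (rows.getD y 0) 16383 := by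
    simp only [List.getD, List.getElem?_map]
    rw [List.getElem?_eq_getElem hy]
    simp [List.getD, List.getElem?_eq_getElem hy]
  rw [h1, (band_mask_toNat (rows.getD y 0)).1]
  rfl

theorem testBit_shl1 (M j : Nat) :
    (M <<< 1).testBit j = (decide (0 < j) && M.testBit (j - 1)) := by
  rw [Nat.testBit_shiftLeft]
  by_cases h : 1 ≤ j
  · simp [h, show 0 < j by omega]
  · have hj0 : j = 0 := by omega
    subst hj0
    simp

theorem testBit_shr1 (M j : Nat) : (M >>> 1).testBit j = M.testBit (j + 1) := by
  rw [Nat.testBit_shiftRight]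
  congr 1
  omega

theorem dilate_once_alt_eq_canon (rows : List Int) :
    dilate_once_alt rows
      = (List.range rows.length).map (fun y => ((valOf (dil rows y) : Nat) : Int)) := by
  unfold dilate_once_alt
  dsimp only
  rw [PySem.List.foldl_append_singleton_eq_map]
  rw [List.nil_append]
  apply List.ext_getElem
  · simp
  intro i hl1 hl2
  have hi : i < rows.length := by simpa using hl2
  simp only [List.getElem_map, List.getElem_range, List.getElem_zipIdx, Nat.zero_add]
  have hlen : (rows.map (fun (r : Int) => PySem.Int.band r (((1 : Int) <<< (14 : Nat)) - 1))).length
      = rows.length := by simp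
  have hgetD : ∀ y, y < rows.length →
      (rows.map (fun (r : Int) => PySem.Int.band r (((1 : Int) <<< (14 : Nat)) - 1))).getD y 0
        = ((rowBits rows y : Nat) : Int) := fun y hy => ms_getD rows y hy
  have hgd : rows.getD i 0 = rows[i]'hi := by
    simp [List.getD, List.getElem?_eq_getElem hi]
  have hgi : PySem.Int.band (rows[i]'hi) (((1 : Int) <<< (14 : Nat)) - 1)
      = ((rowBits rows i : Nat) : Int) := by
    have e : PySem.Int.band (rows[i]'hi) (((1 : Int) <<< (14 : Nat)) - 1)
        = PySem.Int.band (rows.getD i 0) 16383 := by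
      rw [hgd]
      rfl
    rw [e, (band_mask_toNat (rows.getD i 0)).1]
    rfl
  rw [hgi, hlen]
  have hbase : PySem.Int.bor (PySem.Int.bor ((rowBits rows i : Nat) : Int)
        (((rowBits rows i : Nat) : Int) <<< (1 : Nat))) (((rowBits rows i : Nat) : Int) >>> (1 : Nat))
      = ((((rowBits rows i) ||| (rowBits rows i) <<< 1 ||| (rowBits rows i) >>> 1) : Nat) : Int) := by
    rw [int_shiftLeft_natCast, int_shiftRight_natCast, PySem.Int.bor_natCast, PySem.Int.bor_natCast]
  have hmask : ((1 : Int) <<< (14 : Nat)) - 1 = (((16383 : Nat)) : Int) := rfl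
  have hfin : ∀ V : Nat, PySem.Int.band ((V : Nat) : Int) (((1 : Int) <<< (14 : Nat)) - 1)
      = (((V % 2 ^ 14 : Nat)) : Int) := by
    intro V
    rw [hmask, PySem.Int.band_natCast,
        show (V &&& 16383) = V % 2 ^ 14 by
          rw [show (16383:Nat) = 2 ^ 14 - 1 by norm_num, Nat.and_two_pow_sub_one_eq_mod]]
  have heq : ∀ V : Nat, (V % 2 ^ 14) = valOf (fun j => decide (j < 14) && V.testBit j) := by
    intro V
    apply Nat.eq_of_testBit_eq
    intro j
    rw [Nat.testBit_mod_two_pow, valOf_testBit]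
    by_cases hj : j < 14 <;> simp [hj]
  have hfinish : ∀ (V : Nat), (∀ j, j < 14 →
      (V.testBit j = true ↔ dil rows i j = true)) →
      ((valOf (fun j => decide (j < 14) && V.testBit j) : Nat) : Int)
        = ((valOf (dil rows i) : Nat) : Int) := by
    intro V hV
    congr 1
    apply Nat.eq_of_testBit_eq
    intro j
    rw [valOf_testBit, valOf_testBit]
    by_cases hj : j < 14
    · simp only [hj, decide_true, Bool.true_and]
      apply Bool.coe_iff_coe.mp
      exact hV j hj
    · simp [hj]
  by_cases h1 : 0 < i <;> by_cases h2 : i + 1 < rows.length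
  all_goals
    simp only [h1, h2, if_pos, if_neg, if_true, if_false]
  · rw [hbase, hgetD (i - 1) (by omega), hgetD (i + 1) (by omega),
        PySem.Int.bor_natCast, PySem.Int.bor_natCast, hfin, heq]
    apply hfinish
    intro j hj
    unfold dil
    simp only [h1, h2, decide_true, Bool.true_and, Nat.testBit_or, testBit_shl1, testBit_shr1,
      Bool.or_eq_true, Bool.and_eq_true, decide_eq_true_eq]
    tauto
  · rw [hbase, hgetD (i - 1) (by omega), PySem.Int.bor_natCast, hfin, heq]
    apply hfinish
    intro j hj
    unfold dil
    simp only [h1, h2, decide_true, decide_false, Bool.true_and, Bool.false_and, Bool.or_false,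
      Nat.testBit_or, testBit_shl1, testBit_shr1, Bool.or_eq_true, Bool.and_eq_true, decide_eq_true_eq]
    tauto
  · rw [hbase, hgetD (i + 1) (by omega), PySem.Int.bor_natCast, hfin, heq]
    apply hfinish
    intro j hj
    unfold dil
    simp only [h1, h2, decide_true, decide_false, Bool.true_and, Bool.false_and, Bool.or_false,
      Nat.testBit_or, testBit_shl1, testBit_shr1, Bool.or_eq_true, Bool.and_eq_true, decide_eq_true_eq]
    tauto
  · rw [hbase, hfin, heq]
    apply hfinish
    intro j hj
    unfold dil
    simp only [h1, h2, decide_false, Bool.false_and, Bool.or_false, Nat.testBit_or, testBit_shl1, testBit_shr1,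
      Bool.or_eq_true, Bool.and_eq_true, decide_eq_true_eq]
    tauto

-- ===== VERDICT (by name: the statement is the Claim_ definition above) =====
theorem dilate_once_spec : Claim_equal_dilate_once := by
  intro rows _
  unfold Spec_dilate_once
  rw [dilate_once_eq_canon, dilate_once_alt_eq_canon]
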